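-- pv_equiv track=rewrite | github.com/ChrisJulLimantoro/Scheduller-Project | algorithm/fitness.py | cekJam
-- ===== SOURCE A (Python) =====
-- def cekJam(count:list,maksJam:list) -> int:
--     result = 0
--     for i in range(count.__len__()):
--         if count[i] > maksJam[i]:
--             result -= 2*(count[i]-maksJam[i])
--         else:
--             result += 2*(maksJam[i]-count[i])
--     return result
-- ===== SOURCE B (Python) =====
-- def cekJam(count: list, maksJam: list) -> int:
--     # Divide and conquer over the index range [lo, hi): split in half,
--     # combine the two halves' sums; each leaf contributes 2*(maksJam[i]-count[i])
--     # (both branches of the original add exactly that amount).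
--     def go(lo, hi):
--         if hi - lo <= 0:
--             return 0
--         if hi - lo == 1:
--             return 2 * (maksJam[lo] - count[lo])
--         mid = (lo + hi) // 2
--         return go(lo, mid) + go(mid, hi)
--     return go(0, len(count))
-- ===== Notes on version B (the rewrite author's own statement) =====
-- stated objective: alternative
-- what changed: Replaces the sequential branching accumulator loop by a divide-and-conquer recursion over index ranges: split [0,len(count)) in half, each leaf contributes 2*(maksJam[i]-count[i]) (both branches of A add exactly that), and halves are combined by addition.
import Mathlib
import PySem

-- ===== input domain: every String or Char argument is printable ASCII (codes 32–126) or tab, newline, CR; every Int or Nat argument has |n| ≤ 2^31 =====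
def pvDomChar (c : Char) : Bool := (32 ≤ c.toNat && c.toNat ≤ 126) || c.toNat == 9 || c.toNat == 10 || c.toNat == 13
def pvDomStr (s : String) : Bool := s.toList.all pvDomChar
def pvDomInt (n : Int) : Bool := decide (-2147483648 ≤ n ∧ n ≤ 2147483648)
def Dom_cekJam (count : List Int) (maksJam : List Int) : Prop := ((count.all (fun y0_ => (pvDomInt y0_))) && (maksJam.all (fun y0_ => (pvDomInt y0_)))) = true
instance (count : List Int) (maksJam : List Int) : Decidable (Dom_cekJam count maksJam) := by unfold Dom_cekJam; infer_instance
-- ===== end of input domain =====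

-- B replaces A's sequential branching loop by a divide-and-conquer recursion over index ranges (alternative decomposition, same cost).


-- ===== PORT A =====
-- indexing is total via getD; Pre_ below excludes the inputs where Python's maksJam[i] raises IndexError
def cekJam (count : List Int) (maksJam : List Int) : Int :=
  (List.range count.length).foldl
    (fun result i =>
      if count.getD i 0 > maksJam.getD i 0 then
        result - 2 * (count.getD i 0 - maksJam.getD i 0)
      else
        result + 2 * (maksJam.getD i 0 - count.getD i 0))
    0

-- ===== PORT B =====
-- divide-and-conquer helper go(lo, hi) from Source B
def cekJamGo (count : List Int) (maksJam : List Int) (lo hi : Nat) : Int :=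
  if hi - lo ≤ 0 then 0
  else if hi - lo = 1 then 2 * (maksJam.getD lo 0 - count.getD lo 0)
  else
    cekJamGo count maksJam lo ((lo + hi) / 2) + cekJamGo count maksJam ((lo + hi) / 2) hi
termination_by hi - lo
decreasing_by all_goals omega

def cekJam_alt (count : List Int) (maksJam : List Int) : Int :=
  cekJamGo count maksJam 0 count.length

-- ===== PRECONDITION & SPEC =====
-- Pre_: both programs index maksJam[i] for i < len(count); Python raises IndexError when maksJam is shorter.
def Pre_cekJam (count : List Int) (maksJam : List Int) : Prop := count.length ≤ maksJam.length
instance (count : List Int) (maksJam : List Int) : Decidable (Pre_cekJam count maksJam) := by unfold Pre_cekJam; infer_instance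
def pvWitness_cekJam : List Int × List Int := ([1, 3], [2, 5, 7])

def Spec_cekJam (count : List Int) (maksJam : List Int) (out : Int) : Prop := out = cekJam_alt count maksJam
instance (count : List Int) (maksJam : List Int) (out : Int) : Decidable (Spec_cekJam count maksJam out) := by unfold Spec_cekJam; infer_instance

-- ===== CLAIM (what is proved, stated in full; the proofs are below) =====
def Claim_equal_cekJam : Prop := ∀ (count : List Int) (maksJam : List Int), Dom_cekJam count maksJam → Pre_cekJam count maksJam → Spec_cekJam count maksJam (cekJam count maksJam)

-- ===== LEMMAS AND PROOFS =====

-- A's fold accumulates: both branches add 2*(m-c)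
theorem cekJam_foldl_eq (l : List Nat) (count maksJam : List Int) (r : Int) :
    l.foldl
      (fun result i =>
        if count.getD i 0 > maksJam.getD i 0 then
          result - 2 * (count.getD i 0 - maksJam.getD i 0)
        else
          result + 2 * (maksJam.getD i 0 - count.getD i 0))
      r
    = r + ((l.map (fun i => 2 * (maksJam.getD i 0 - count.getD i 0))).sum) := by
  induction l generalizing r with
  | nil => simp
  | cons a t ih =>
    simp only [List.foldl_cons, List.map_cons, List.sum_cons, ih]
    split_ifs <;> ring

-- B's divide-and-conquer computes the same per-index sum over [lo, hi)
theorem cekJamGo_eq (count maksJam : List Int) :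
    ∀ n lo hi, hi - lo = n →
      cekJamGo count maksJam lo hi
        = ((List.range' lo (hi - lo)).map
            (fun i => 2 * (maksJam.getD i 0 - count.getD i 0))).sum := by
  intro n
  induction n using Nat.strong_induction_on with
  | _ n ih =>
    intro lo hi h
    rw [cekJamGo]
    split_ifs with h0 h1
    · have : hi - lo = 0 := by omega
      simp [this]
    · rw [h1]; simp [List.range']
    · have hlo : lo < (lo + hi) / 2 := by omega
      have hhi : (lo + hi) / 2 < hi := by omega
      rw [ih ((lo + hi) / 2 - lo) (by omega) lo ((lo + hi) / 2) rfl,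
          ih (hi - (lo + hi) / 2) (by omega) ((lo + hi) / 2) hi rfl]
      have hsplit :
          List.range' lo (hi - lo)
            = List.range' lo ((lo + hi) / 2 - lo)
              ++ List.range' ((lo + hi) / 2) (hi - (lo + hi) / 2) := by
        have h := @List.range'_append lo ((lo + hi) / 2 - lo) (hi - (lo + hi) / 2) 1
        rw [show lo + 1 * ((lo + hi) / 2 - lo) = (lo + hi) / 2 from by omega] at h
        rw [show ((lo + hi) / 2 - lo) + (hi - (lo + hi) / 2) = hi - lo from by omega] at h
        exact h.symm
      rw [hsplit, List.map_append, List.sum_append]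

-- ===== VERDICT (by name: the statement is the Claim_ definition above) =====
theorem cekJam_spec : Claim_equal_cekJam := by
  intro count maksJam _ _
  unfold Spec_cekJam cekJam cekJam_alt
  rw [cekJam_foldl_eq, cekJamGo_eq count maksJam (count.length - 0) 0 count.length rfl]
  simp [List.range_eq_range']
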